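-- pv_equiv track=rewrite | github.com/jinhyo-dev/BOJ | Java vs C++.py | mode_check
-- ===== SOURCE A (Python) =====
-- def mode_check(s):
--   upp_count = 0
--   underbar_count = 0
--   dup = 0
--   dup_flag = False
--
--   if len(s) > 0 and s[0].isupper():
--     return 'ERROR'
--
--   if len(s) > 0 and s[0] == '_':
--     return 'ERROR'
--
--   if len(s) > 0 and s[-1] == '_':
--     return 'ERROR'
--
--   for c in s:
--     if c.isupper():
--       upp_count += 1
--       dup = 0
--     elif c == '_':
--       underbar_count += 1
--       dup += 1
--       if dup == 2:
--         return 'ERROR'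
--     else:
--       dup = 0
--
--   if upp_count != 0 and underbar_count != 0:
--     return 'ERROR'
--
--   if underbar_count > 0:
--     return 'C'
--   else:
--     return 'JAVA'
-- ===== SOURCE B (Python) =====
-- def mode_check(s):
--     if not s:
--         return 'JAVA'
--     if s[0].isupper() or s[0] == '_' or s[-1] == '_' or '__' in s:
--         return 'ERROR'
--     has_upper = any(c.isupper() for c in s)
--     has_under = '_' in s
--     if has_upper and has_under:
--         return 'ERROR'
--     return 'C' if has_under else 'JAVA'
-- ===== Notes on version B (the rewrite author's own statement) =====
-- stated objective: simpler
-- what changed: Replaces A's single fused counting loop (two counters plus a consecutive-duplicate state with an early return) by separate built-in presence tests: a double-underscore substring check, an any-uppercase test and an underscore membership test.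
import Mathlib
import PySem

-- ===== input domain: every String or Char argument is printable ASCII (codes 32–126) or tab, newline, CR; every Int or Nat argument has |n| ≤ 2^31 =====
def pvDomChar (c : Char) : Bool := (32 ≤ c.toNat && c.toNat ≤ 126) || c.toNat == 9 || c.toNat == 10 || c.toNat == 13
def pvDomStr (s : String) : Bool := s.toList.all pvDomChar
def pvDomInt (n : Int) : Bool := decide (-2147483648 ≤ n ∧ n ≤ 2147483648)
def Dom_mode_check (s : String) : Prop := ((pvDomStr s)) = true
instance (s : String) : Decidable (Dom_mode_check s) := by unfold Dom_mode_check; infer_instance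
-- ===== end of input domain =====

-- B replaces A's fused counting loop (counters + consecutive-underscore state) by separate
-- built-in presence tests (double-underscore substring, any-uppercase, underscore membership): simpler, same cost.

-- ===== PORT A =====
-- A's for-loop: state (upp_count, underbar_count, dup); `none` = the early `return 'ERROR'` at dup == 2
def modeLoop : List Char → Nat → Nat → Nat → Option (Nat × Nat)
  | [], u, un, _ => some (u, un)
  | c :: rest, u, un, d =>
    if PySem.Chars.isupper c then modeLoop rest (u + 1) un 0
    else if c = '_' then
      if d + 1 = 2 then none else modeLoop rest u (un + 1) (d + 1)
    else modeLoop rest u un 0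

def mode_check (s : String) : String :=
  let cs := s.toList
  -- `len(s) > 0 and s[i]…`: the length guard makes pyGet? return `some`, so `.getD ' '` is never the default
  if 0 < cs.length ∧ PySem.Chars.isupper ((PySem.List.pyGet? cs 0).getD ' ') = true then "ERROR"
  else if 0 < cs.length ∧ (PySem.List.pyGet? cs 0).getD ' ' = '_' then "ERROR"
  else if 0 < cs.length ∧ (PySem.List.pyGet? cs (-1)).getD ' ' = '_' then "ERROR"
  else
    match modeLoop cs 0 0 0 with
    | none => "ERROR"
    | some (upp, und) =>
      if upp ≠ 0 ∧ und ≠ 0 then "ERROR"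
      else if 0 < und then "C" else "JAVA"

-- ===== PORT B =====
def mode_check_alt (s : String) : String :=
  match s.toList with
  | [] => "JAVA"
  | c :: rest =>
    if PySem.Chars.isupper c || (c == '_') || ((c :: rest).getLast (List.cons_ne_nil c rest) == '_')
        || PySem.Chars.isIn ['_', '_'] (c :: rest) then "ERROR"
    else
      let hasUpper := (c :: rest).any PySem.Chars.isupper
      let hasUnder := PySem.Chars.isIn ['_'] (c :: rest)
      if hasUpper && hasUnder then "ERROR"
      else if hasUnder then "C" else "JAVA"

-- ===== PRECONDITION & SPEC =====
def Spec_mode_check (s : String) (out : String) : Prop := out = mode_check_alt s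
instance (s : String) (out : String) : Decidable (Spec_mode_check s out) := by unfold Spec_mode_check; infer_instance

-- ===== CLAIM (what is proved, stated in full; the proofs are below) =====
def Claim_equal_mode_check : Prop := ∀ (s : String), Dom_mode_check s → Spec_mode_check s (mode_check s)

-- ===== LEMMAS AND PROOFS =====

lemma isupper_ne_underscore {c : Char} (h : PySem.Chars.isupper c = true) : c ≠ '_' := by
  rintro rfl; exact absurd h (by decide)

lemma singleton_prefix_iff_head (a : Char) (l : List Char) : [a] <+: l ↔ l.head? = some a := by
  cases l with
  | nil => simp
  | cons b t => simp [List.cons_prefix_cons, eq_comm]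

lemma twoUnder_cons (c : Char) (rest : List Char) :
    (['_', '_'] <:+: c :: rest) ↔ (c = '_' ∧ rest.head? = some '_') ∨ ['_', '_'] <:+: rest := by
  rw [List.infix_cons_iff, List.cons_prefix_cons, singleton_prefix_iff_head, eq_comm]

lemma modeLoop_spec (cs : List Char) (u un d : Nat) (hd : d ≤ 1) :
    modeLoop cs u un d =
      if (d = 1 ∧ cs.head? = some '_') ∨ ['_', '_'] <:+: cs then none
      else some (u + cs.countP PySem.Chars.isupper, un + cs.count '_') := by
  induction cs generalizing u un d with
  | nil => simp [modeLoop]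
  | cons c rest ih =>
    by_cases hu : PySem.Chars.isupper c = true
    · have hne : c ≠ '_' := isupper_ne_underscore hu
      rw [show modeLoop (c :: rest) u un d = modeLoop rest (u + 1) un 0 by simp [modeLoop, hu],
        ih _ _ _ (by omega)]
      have : ¬ ((d = 1 ∧ (c :: rest).head? = some '_') ∨ ['_', '_'] <:+: c :: rest) ↔
          ¬ ((0 = 1 ∧ rest.head? = some '_') ∨ ['_', '_'] <:+: rest) := by
        rw [twoUnder_cons]; simp [hne]
      by_cases hinf : (0 = 1 ∧ rest.head? = some '_') ∨ ['_', '_'] <:+: rest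
      · simp only [if_pos hinf]; rw [if_pos (by tauto)]
      · simp only [if_neg hinf]; rw [if_neg (this.mpr hinf)]
        simp [hu, hne]
        omega
    · by_cases hc : c = '_'
      · subst hc
        by_cases hd1 : d = 1
        · subst hd1
          rw [show modeLoop ('_' :: rest) u un 1 = none by simp [modeLoop, hu]]
          rw [if_pos (Or.inl ⟨rfl, rfl⟩)]
        · have hd0 : d = 0 := by omega
          subst hd0
          rw [show modeLoop ('_' :: rest) u un 0 = modeLoop rest u (un + 1) 1 by
            simp [modeLoop, hu], ih _ _ _ (by omega)]
          have hcond : ((1 = 1 ∧ rest.head? = some '_') ∨ ['_', '_'] <:+: rest) ↔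
              ((0 = 1 ∧ ('_' :: rest).head? = some '_') ∨ ['_', '_'] <:+: '_' :: rest) := by
            rw [twoUnder_cons]; simp
          by_cases hinf : (1 = 1 ∧ rest.head? = some '_') ∨ ['_', '_'] <:+: rest
          · rw [if_pos hinf, if_pos (hcond.mp hinf)]
          · rw [if_neg hinf, if_neg (fun h => hinf (hcond.mpr h))]
            simp [hu]
            omega
      · rw [show modeLoop (c :: rest) u un d = modeLoop rest u un 0 by simp [modeLoop, hu, hc],
          ih _ _ _ (by omega)]
        have hcond : ((0 = 1 ∧ rest.head? = some '_') ∨ ['_', '_'] <:+: rest) ↔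
            ((d = 1 ∧ (c :: rest).head? = some '_') ∨ ['_', '_'] <:+: c :: rest) := by
          rw [twoUnder_cons]; simp [hc]
        by_cases hinf : (0 = 1 ∧ rest.head? = some '_') ∨ ['_', '_'] <:+: rest
        · rw [if_pos hinf, if_pos (hcond.mp hinf)]
        · rw [if_neg hinf, if_neg (fun h => hinf (hcond.mpr h))]
          simp [hu, hc]

lemma pyGet_neg_one (c : Char) (rest : List Char) :
    PySem.List.pyGet? (c :: rest) (-1) = some ((c :: rest).getLast (List.cons_ne_nil c rest)) := by
  simp [PySem.List.pyGet?, PySem.List.pyIdx?, List.getLast_eq_getElem]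
  rfl

-- ===== VERDICT (by name: the statement is the Claim_ definition above) =====
theorem mode_check_spec : Claim_equal_mode_check := by
  intro s _
  show mode_check s = mode_check_alt s
  unfold mode_check mode_check_alt
  cases hcs : s.toList with
  | nil => simp [modeLoop]
  | cons c rest =>
    simp only []
    by_cases hu : PySem.Chars.isupper c = true
    · rw [if_pos ⟨by simp, by simp [hu]⟩]; simp [hu]
    · by_cases hc : c = '_'
      · rw [if_neg (by simp [hu]), if_pos ⟨by simp, by simp [hc]⟩]
        simp [hc]
      · by_cases hl : (c :: rest).getLast (List.cons_ne_nil c rest) = '_'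
        · rw [if_neg (by simp [hu]), if_neg (by simp [hc]),
            if_pos ⟨by simp, by rw [pyGet_neg_one]; simpa using hl⟩]
          simp [hl]
        · rw [if_neg (by simp [hu]), if_neg (by simp [hc]),
            if_neg (by rw [pyGet_neg_one]; simp [hl]),
            modeLoop_spec _ _ _ _ (by omega)]
          by_cases hinf : ['_', '_'] <:+: c :: rest
          · rw [if_pos (Or.inr hinf)]
            have : PySem.Chars.isIn ['_', '_'] (c :: rest) = true :=
              (PySem.Chars.isIn_iff_infix _ _).mpr hinf
            simp [hu, this]
          · rw [if_neg (by simp [hinf])]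
            have h2 : PySem.Chars.isIn ['_', '_'] (c :: rest) = false :=
              (PySem.Chars.isIn_eq_false_iff _ _).mpr hinf
            rw [if_neg (by simp [hu, hc, hl, h2])]
            have hmem : PySem.Chars.isIn ['_'] (c :: rest) = true ↔ '_' ∈ c :: rest := by
              rw [PySem.Chars.isIn_iff_infix, List.singleton_infix_iff]
            have hany : (c :: rest).any PySem.Chars.isupper = true ↔
                (c :: rest).countP PySem.Chars.isupper ≠ 0 := by
              rw [List.any_eq_true, Ne, List.countP_eq_zero]
              push Not
              simp
            have hcnt : 0 < (c :: rest).count '_' ↔ '_' ∈ c :: rest := List.count_pos_iff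
            simp only [Nat.zero_add]
            show (if (c :: rest).countP PySem.Chars.isupper ≠ 0 ∧ (c :: rest).count '_' ≠ 0
                then "ERROR" else if 0 < (c :: rest).count '_' then "C" else "JAVA") = _
            by_cases hud : '_' ∈ c :: rest
            · have hD0 : (c :: rest).count '_' ≠ 0 := by have := hcnt.mpr hud; omega
              have hm1 : PySem.Chars.isIn ['_'] (c :: rest) = true := hmem.mpr hud
              by_cases hup : (c :: rest).any PySem.Chars.isupper = true
              · rw [if_pos ⟨hany.mp hup, hD0⟩]; simp [hup, hm1]
              · have hU0 : (c :: rest).countP PySem.Chars.isupper = 0 := by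
                  by_contra h; exact hup (hany.mpr h)
                rw [if_neg (by simp [hU0]), if_pos (by omega)]
                simp [Bool.eq_false_iff.mpr hup, hm1]
            · have hD0 : (c :: rest).count '_' = 0 := by
                by_contra h; exact hud (hcnt.mp (by omega))
              have hm1 : PySem.Chars.isIn ['_'] (c :: rest) = false := by
                cases h : PySem.Chars.isIn ['_'] (c :: rest)
                · rfl
                · exact absurd (hmem.mp h) hud
              rw [if_neg (by simp [hD0]), if_neg (by omega)]
              simp [hm1]
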